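-- pv_equiv track=rewrite | github.com/mineworker-x29/ChantaCore | src/chanta_core/pig/reports.py | _memory_instruction_summary
-- ===== SOURCE A (Python) =====
-- from typing import Any
--
-- def _memory_instruction_summary(
--     object_type_counts: dict[str, int],
--     event_activity_counts: dict[str, int],
-- ) -> dict[str, Any]:
--     memory_events = {
--         "memory_entry_created",
--         "memory_entry_revised",
--         "memory_entry_superseded",
--         "memory_entry_archived",
--         "memory_entry_withdrawn",
--         "memory_revision_recorded",
--         "memory_derived_from_message",
--         "memory_attached_to_session",
--         "memory_attached_to_turn",
--     }
--     instruction_events = {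
--         "instruction_artifact_registered",
--         "instruction_artifact_revised",
--         "instruction_artifact_deprecated",
--         "project_rule_registered",
--         "project_rule_revised",
--         "user_preference_registered",
--         "user_preference_revised",
--     }
--     return {
--         "memory_entry_count": object_type_counts.get("memory_entry", 0),
--         "memory_revision_count": object_type_counts.get("memory_revision", 0),
--         "instruction_artifact_count": object_type_counts.get("instruction_artifact", 0),
--         "project_rule_count": object_type_counts.get("project_rule", 0),
--         "user_preference_count": object_type_counts.get("user_preference", 0),
--         "memory_event_count": sum(
--             event_activity_counts.get(activity, 0) for activity in memory_events
--         ),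
--         "instruction_event_count": sum(
--             event_activity_counts.get(activity, 0)
--             for activity in instruction_events
--         ),
--     }
-- ===== SOURCE B (Python) =====
-- _FIELDS = [
--     ("memory_entry_count", "memory_entry"),
--     ("memory_revision_count", "memory_revision"),
--     ("instruction_artifact_count", "instruction_artifact"),
--     ("project_rule_count", "project_rule"),
--     ("user_preference_count", "user_preference"),
-- ]
--
-- _EVENT_BUCKET = {
--     "memory_entry_created": "memory_event_count",
--     "memory_entry_revised": "memory_event_count",
--     "memory_entry_superseded": "memory_event_count",
--     "memory_entry_archived": "memory_event_count",
--     "memory_entry_withdrawn": "memory_event_count",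
--     "memory_revision_recorded": "memory_event_count",
--     "memory_derived_from_message": "memory_event_count",
--     "memory_attached_to_session": "memory_event_count",
--     "memory_attached_to_turn": "memory_event_count",
--     "instruction_artifact_registered": "instruction_event_count",
--     "instruction_artifact_revised": "instruction_event_count",
--     "instruction_artifact_deprecated": "instruction_event_count",
--     "project_rule_registered": "instruction_event_count",
--     "project_rule_revised": "instruction_event_count",
--     "user_preference_registered": "instruction_event_count",
--     "user_preference_revised": "instruction_event_count",
-- }
--
--
-- def _memory_instruction_summary(
--     object_type_counts: dict,
--     event_activity_counts: dict,
-- ) -> dict: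
--     result = {out_key: object_type_counts.get(src_key, 0) for out_key, src_key in _FIELDS}
--     result["memory_event_count"] = 0
--     result["instruction_event_count"] = 0
--     for activity, count in event_activity_counts.items():
--         bucket = _EVENT_BUCKET.get(activity)
--         if bucket is not None:
--             result[bucket] += count
--     return result
-- ===== Notes on version B (the rewrite author's own statement) =====
-- stated objective: alternative
-- what changed: Table-driven rewrite: the five scalar lookups come from a field table, and the two comprehension-sums over fixed event-name sets are replaced by one pass over event_activity_counts that routes each count into the result via an event-to-bucket lookup dict.
import Mathlib
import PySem

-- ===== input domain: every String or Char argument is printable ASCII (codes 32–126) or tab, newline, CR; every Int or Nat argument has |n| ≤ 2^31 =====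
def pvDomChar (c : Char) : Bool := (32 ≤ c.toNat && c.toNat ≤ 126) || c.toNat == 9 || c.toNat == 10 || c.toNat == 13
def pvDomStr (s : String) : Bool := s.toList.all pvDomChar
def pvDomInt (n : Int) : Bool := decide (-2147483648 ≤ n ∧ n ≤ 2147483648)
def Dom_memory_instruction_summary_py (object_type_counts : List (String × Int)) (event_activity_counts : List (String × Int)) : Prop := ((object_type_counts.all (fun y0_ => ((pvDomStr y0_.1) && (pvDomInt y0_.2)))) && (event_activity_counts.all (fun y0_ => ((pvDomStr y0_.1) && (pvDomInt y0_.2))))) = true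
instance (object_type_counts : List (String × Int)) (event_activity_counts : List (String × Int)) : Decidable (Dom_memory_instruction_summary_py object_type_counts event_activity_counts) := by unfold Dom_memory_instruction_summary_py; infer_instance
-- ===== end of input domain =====

-- B is a table-driven rewrite of A: a field table for the five scalar lookups and an
-- event-name -> bucket-key dict, with one pass over event_activity_counts accumulating
-- into the result (alternative decomposition, same cost on these fixed key sets).

-- ===== PORT A =====
-- the two fixed event-name sets of A (Python set literals; summed, so order-independent)
def pvMemoryEvents : List String :=
  ["memory_entry_created", "memory_entry_revised", "memory_entry_superseded",
   "memory_entry_archived", "memory_entry_withdrawn", "memory_revision_recorded",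
   "memory_derived_from_message", "memory_attached_to_session", "memory_attached_to_turn"]

def pvInstructionEvents : List String :=
  ["instruction_artifact_registered", "instruction_artifact_revised",
   "instruction_artifact_deprecated", "project_rule_registered", "project_rule_revised",
   "user_preference_registered", "user_preference_revised"]

def memory_instruction_summary_py (object_type_counts : List (String × Int)) (event_activity_counts : List (String × Int)) : List (String × Int) :=
  let o := PySem.Dict.mk object_type_counts
  let e := PySem.Dict.mk event_activity_counts
  [("memory_entry_count", o.getD "memory_entry" 0),
   ("memory_revision_count", o.getD "memory_revision" 0),
   ("instruction_artifact_count", o.getD "instruction_artifact" 0),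
   ("project_rule_count", o.getD "project_rule" 0),
   ("user_preference_count", o.getD "user_preference" 0),
   ("memory_event_count", (pvMemoryEvents.map (fun a => e.getD a 0)).sum),
   ("instruction_event_count", (pvInstructionEvents.map (fun a => e.getD a 0)).sum)]

-- ===== PORT B =====
-- B's module-level tables _FIELDS and _EVENT_BUCKET
def pvFields : List (String × String) :=
  [("memory_entry_count", "memory_entry"),
   ("memory_revision_count", "memory_revision"),
   ("instruction_artifact_count", "instruction_artifact"),
   ("project_rule_count", "project_rule"),
   ("user_preference_count", "user_preference")]

def pvEventBucket : PySem.Dict String String := PySem.Dict.mk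
  [("memory_entry_created", "memory_event_count"),
   ("memory_entry_revised", "memory_event_count"),
   ("memory_entry_superseded", "memory_event_count"),
   ("memory_entry_archived", "memory_event_count"),
   ("memory_entry_withdrawn", "memory_event_count"),
   ("memory_revision_recorded", "memory_event_count"),
   ("memory_derived_from_message", "memory_event_count"),
   ("memory_attached_to_session", "memory_event_count"),
   ("memory_attached_to_turn", "memory_event_count"),
   ("instruction_artifact_registered", "instruction_event_count"),
   ("instruction_artifact_revised", "instruction_event_count"),
   ("instruction_artifact_deprecated", "instruction_event_count"),
   ("project_rule_registered", "instruction_event_count"),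
   ("project_rule_revised", "instruction_event_count"),
   ("user_preference_registered", "instruction_event_count"),
   ("user_preference_revised", "instruction_event_count")]

def memory_instruction_summary_py_alt (object_type_counts : List (String × Int)) (event_activity_counts : List (String × Int)) : List (String × Int) :=
  -- result = {out: object_type_counts.get(src, 0) for out, src in _FIELDS}; then the two counters set to 0
  let result : PySem.Dict String Int :=
    ((PySem.Dict.mk (pvFields.map
        (fun f => (f.1, (PySem.Dict.mk object_type_counts).getD f.2 0)))).insert
      "memory_event_count" 0).insert "instruction_event_count" 0
  -- for activity, count in event_activity_counts.items(): route count via the bucket table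
  -- (result[bucket] += count is exact as modify with default 0: bucket keys are always present)
  let result := event_activity_counts.foldl
    (fun (d : PySem.Dict String Int) p =>
      match pvEventBucket.get? p.1 with
      | some b => d.modify b 0 (· + p.2)
      | none => d)
    result
  result.items

-- ===== PRECONDITION & SPEC =====
-- Pre_ excludes only association lists with duplicate keys in event_activity_counts: a Python
-- dict argument can never have duplicate keys, so this excludes no input the Python A accepts.
def Pre_memory_instruction_summary_py (object_type_counts : List (String × Int)) (event_activity_counts : List (String × Int)) : Prop :=
  (event_activity_counts.map Prod.fst).Nodup
instance (object_type_counts : List (String × Int)) (event_activity_counts : List (String × Int)) : Decidable (Pre_memory_instruction_summary_py object_type_counts event_activity_counts) := by unfold Pre_memory_instruction_summary_py; infer_instance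

def pvWitness_memory_instruction_summary_py : (List (String × Int)) × (List (String × Int)) :=
  ([("memory_entry", 3)], [("memory_entry_created", 2), ("project_rule_revised", 1)])

def Spec_memory_instruction_summary_py (object_type_counts : List (String × Int)) (event_activity_counts : List (String × Int)) (out : List (String × Int)) : Prop := out = memory_instruction_summary_py_alt object_type_counts event_activity_counts
instance (object_type_counts : List (String × Int)) (event_activity_counts : List (String × Int)) (out : List (String × Int)) : Decidable (Spec_memory_instruction_summary_py object_type_counts event_activity_counts out) := by unfold Spec_memory_instruction_summary_py; infer_instance

-- ===== CLAIM =====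
def Claim_equal_memory_instruction_summary_py : Prop := ∀ (object_type_counts : List (String × Int)) (event_activity_counts : List (String × Int)), Dom_memory_instruction_summary_py object_type_counts event_activity_counts → Pre_memory_instruction_summary_py object_type_counts event_activity_counts → Spec_memory_instruction_summary_py object_type_counts event_activity_counts (memory_instruction_summary_py object_type_counts event_activity_counts)

-- ===== LEMMAS AND PROOFS =====

-- getD on a literal dict, cons case
theorem getD_mk_cons (k : String) (v : Int) (rest : List (String × Int)) (x : String) :
    (PySem.Dict.mk ((k, v) :: rest)).getD x 0 = if k == x then v else (PySem.Dict.mk rest).getD x 0 := by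
  rw [PySem.Dict.getD_eq_get?_getD, PySem.Dict.get?_mk_cons, PySem.Dict.getD_eq_get?_getD]
  split <;> rfl

theorem getD_mk_absent (l : List (String × Int)) (k : String) (h : k ∉ l.map Prod.fst) :
    (PySem.Dict.mk l).getD k 0 = 0 := by
  induction l with
  | nil => rfl
  | cons p rest ih =>
    obtain ⟨a, b⟩ := p
    simp only [List.map_cons, List.mem_cons, not_or] at h
    rw [getD_mk_cons]
    simp only [beq_iff_eq]
    rw [if_neg (fun hk => h.1 hk.symm)]
    exact ih h.2

theorem sum_map_ite_nodup (S : List String) (hS : S.Nodup) (k : String) (v : Int) :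
    (S.map (fun a => if a = k then v else 0)).sum = if k ∈ S then v else 0 := by
  induction S with
  | nil => simp
  | cons a S' ih =>
    simp only [List.nodup_cons] at hS
    simp only [List.map_cons, List.sum_cons, List.mem_cons]
    by_cases hak : a = k
    · subst hak
      have h0 : (S'.map (fun b => if b = a then v else 0)).sum = 0 := by
        apply List.sum_eq_zero
        intro x hx
        simp only [List.mem_map] at hx
        obtain ⟨b, hb, hbx⟩ := hx
        have hba : b ≠ a := fun h => hS.1 (by rw [← h]; exact hb)
        rw [if_neg hba] at hbx
        exact hbx.symm
      simp [h0]
    · rw [if_neg hak, ih hS.2]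
      simp [Ne.symm hak]

-- A's sum of getD over a nodup key set equals the filtered value sum over a nodup assoc list
theorem sum_getD_eq_filter_sum (S : List String) (hS : S.Nodup) :
    ∀ (l : List (String × Int)), (l.map Prod.fst).Nodup →
      (S.map (fun a => (PySem.Dict.mk l).getD a 0)).sum
        = ((l.filter (fun p => decide (p.1 ∈ S))).map Prod.snd).sum := by
  intro l
  induction l with
  | nil =>
    intro _
    simp only [List.filter_nil, List.map_nil, List.sum_nil]
    apply List.sum_eq_zero
    intro x hx
    simp only [List.mem_map] at hx
    obtain ⟨b, _, hbx⟩ := hx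
    simpa using hbx.symm
  | cons p rest ih =>
    intro hnd
    obtain ⟨k, v⟩ := p
    simp only [List.map_cons, List.nodup_cons] at hnd
    have hterm : ∀ a ∈ S, (PySem.Dict.mk ((k, v) :: rest)).getD a 0
        = (PySem.Dict.mk rest).getD a 0 + (if a = k then v else 0) := by
      intro a _
      rw [getD_mk_cons]
      by_cases hak : a = k
      · subst hak
        simp [getD_mk_absent rest a hnd.1]
      · simp [Ne.symm hak, hak]
    rw [List.map_congr_left hterm]
    have := PySem.List.sum_map_add_int (xs := S) (f := fun a => (PySem.Dict.mk rest).getD a 0)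
      (g := fun a => if a = k then v else 0)
    rw [this, ih hnd.2, sum_map_ite_nodup S hS k v]
    by_cases hkS : k ∈ S
    · simp [hkS]
      ring
    · simp [hkS]

-- member of the memory set is not in the instruction set
theorem mem_not_instr (a : String) (h : a ∈ pvMemoryEvents) : a ∉ pvInstructionEvents := by
  simp only [pvMemoryEvents, List.mem_cons, List.not_mem_nil, or_false] at h
  rcases h with h|h|h|h|h|h|h|h|h <;> subst h <;> decide

-- the bucket table's lookup, characterised by membership in A's two sets
theorem bucket_get (a : String) : pvEventBucket.get? a =
    if a ∈ pvMemoryEvents then some "memory_event_count"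
    else if a ∈ pvInstructionEvents then some "instruction_event_count" else none := by
  by_cases hm : a ∈ pvMemoryEvents
  · have h := hm
    simp only [pvMemoryEvents, List.mem_cons, List.not_mem_nil, or_false] at h
    rw [if_pos hm]
    rcases h with h|h|h|h|h|h|h|h|h <;> subst h <;> decide
  · by_cases hi : a ∈ pvInstructionEvents
    · have h := hi
      simp only [pvInstructionEvents, List.mem_cons, List.not_mem_nil, or_false] at h
      rw [if_neg hm, if_pos hi]
      rcases h with h|h|h|h|h|h|h <;> subst h <;> decide
    · rw [if_neg hm, if_neg hi]
      simp only [pvMemoryEvents, List.mem_cons, List.not_mem_nil, or_false, not_or] at hm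
      simp only [pvInstructionEvents, List.mem_cons, List.not_mem_nil, or_false, not_or] at hi
      obtain ⟨n1,n2,n3,n4,n5,n6,n7,n8,n9⟩ := hm
      obtain ⟨m1,m2,m3,m4,m5,m6,m7⟩ := hi
      simp [pvEventBucket, beq_iff_eq,
        Ne.symm n1, Ne.symm n2, Ne.symm n3, Ne.symm n4, Ne.symm n5, Ne.symm n6, Ne.symm n7,
        Ne.symm n8, Ne.symm n9,
        Ne.symm m1, Ne.symm m2, Ne.symm m3, Ne.symm m4, Ne.symm m5, Ne.symm m6, Ne.symm m7,
        PySem.Dict.get?]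

-- B's accumulation loop on the fixed-shape result dict, with the counters in the last two slots
theorem foldl_bucket_eq (v1 v2 v3 v4 v5 : Int) (l : List (String × Int)) :
    ∀ (m i : Int),
      l.foldl
        (fun (d : PySem.Dict String Int) p =>
          match pvEventBucket.get? p.1 with
          | some b => d.modify b 0 (· + p.2)
          | none => d)
        (PySem.Dict.mk
          [("memory_entry_count", v1), ("memory_revision_count", v2),
           ("instruction_artifact_count", v3), ("project_rule_count", v4),
           ("user_preference_count", v5), ("memory_event_count", m),
           ("instruction_event_count", i)])
      = PySem.Dict.mk
          [("memory_entry_count", v1), ("memory_revision_count", v2),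
           ("instruction_artifact_count", v3), ("project_rule_count", v4),
           ("user_preference_count", v5),
           ("memory_event_count", m + ((l.filter (fun p => decide (p.1 ∈ pvMemoryEvents))).map Prod.snd).sum),
           ("instruction_event_count", i + ((l.filter (fun p => decide (p.1 ∈ pvInstructionEvents))).map Prod.snd).sum)] := by
  induction l with
  | nil => intro m i; simp
  | cons p rest ih =>
    intro m i
    by_cases h1 : p.1 ∈ pvMemoryEvents
    · have h2 : p.1 ∉ pvInstructionEvents := mem_not_instr p.1 h1
      have hg : pvEventBucket.get? p.1 = some "memory_event_count" := by
        rw [bucket_get, if_pos h1]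
      have hstep : (PySem.Dict.mk
            [("memory_entry_count", v1), ("memory_revision_count", v2),
             ("instruction_artifact_count", v3), ("project_rule_count", v4),
             ("user_preference_count", v5), ("memory_event_count", m),
             ("instruction_event_count", i)]).modify "memory_event_count" 0 (· + p.2)
          = PySem.Dict.mk
            [("memory_entry_count", v1), ("memory_revision_count", v2),
             ("instruction_artifact_count", v3), ("project_rule_count", v4),
             ("user_preference_count", v5), ("memory_event_count", m + p.2),
             ("instruction_event_count", i)] := by
        apply PySem.Dict.ext; rfl
      rw [List.foldl_cons]
      simp only [hg, hstep, ih]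
      simp [h1, h2, add_assoc]
    · by_cases h2 : p.1 ∈ pvInstructionEvents
      · have hg : pvEventBucket.get? p.1 = some "instruction_event_count" := by
          rw [bucket_get, if_neg h1, if_pos h2]
        have hstep : (PySem.Dict.mk
              [("memory_entry_count", v1), ("memory_revision_count", v2),
               ("instruction_artifact_count", v3), ("project_rule_count", v4),
               ("user_preference_count", v5), ("memory_event_count", m),
               ("instruction_event_count", i)]).modify "instruction_event_count" 0 (· + p.2)
            = PySem.Dict.mk
              [("memory_entry_count", v1), ("memory_revision_count", v2),
               ("instruction_artifact_count", v3), ("project_rule_count", v4),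
               ("user_preference_count", v5), ("memory_event_count", m),
               ("instruction_event_count", i + p.2)] := by
          apply PySem.Dict.ext; rfl
        rw [List.foldl_cons]
        simp only [hg, hstep, ih]
        simp [h1, h2, add_assoc]
      · have hg : pvEventBucket.get? p.1 = none := by
          rw [bucket_get, if_neg h1, if_neg h2]
        rw [List.foldl_cons]
        simp only [hg, ih]
        simp [h1, h2]

-- ===== VERDICT =====
theorem memory_instruction_summary_py_spec : Claim_equal_memory_instruction_summary_py := by
  intro otc eac _ hpre
  unfold Spec_memory_instruction_summary_py memory_instruction_summary_py memory_instruction_summary_py_alt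
  have hinit : ((PySem.Dict.mk (pvFields.map
        (fun f => (f.1, (PySem.Dict.mk otc).getD f.2 0)))).insert
      "memory_event_count" 0).insert "instruction_event_count" (0 : Int)
      = PySem.Dict.mk
        [("memory_entry_count", (PySem.Dict.mk otc).getD "memory_entry" 0),
         ("memory_revision_count", (PySem.Dict.mk otc).getD "memory_revision" 0),
         ("instruction_artifact_count", (PySem.Dict.mk otc).getD "instruction_artifact" 0),
         ("project_rule_count", (PySem.Dict.mk otc).getD "project_rule" 0),
         ("user_preference_count", (PySem.Dict.mk otc).getD "user_preference" 0),
         ("memory_event_count", 0), ("instruction_event_count", 0)] := by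
    apply PySem.Dict.ext; rfl
  simp only [hinit, foldl_bucket_eq, zero_add,
    sum_getD_eq_filter_sum pvMemoryEvents (by decide) eac hpre,
    sum_getD_eq_filter_sum pvInstructionEvents (by decide) eac hpre]
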